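-- pv_equiv track=rewrite | github.com/hsci-r/shortsim | src/shortsim/scripts/fastss.py | similarity
-- ===== SOURCE A (Python) =====
-- from operator import itemgetter
--
-- def delenv(string, maxdels):
--     result = set()
--     queue = [(string, 0)]
--     while queue:
--         substr, ndel = queue.pop()
--         result.add(substr)
--         for i in range(len(substr)):
--             substr2 = substr[:i]+substr[i+1:]
--             if ndel < maxdels:
--                 queue.append((substr2, ndel+1))
--     return result
--
-- def group(lst, key):
--     cur_key, cur_grp = None, []
--     for item in lst:
--         if key(item) == cur_key:
--             cur_grp.append(item)
--         else:
--             if cur_key is not None: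
--                 yield cur_key, cur_grp
--             cur_key, cur_grp = key(item), [item]
--     if cur_key is not None:
--         yield cur_key, cur_grp
--
-- def similarity(strings, maxdels, **kwargs):
--     s_ss = []
--     result = set()
--     for (i, s) in strings:
--         for ss in delenv(s, maxdels, **kwargs):
--             s_ss.append((hash(ss), i))
--     s_ss.sort(key=itemgetter(0))
--     for ss, grp in group(s_ss, itemgetter(0)):
--         for ss2, i in grp:
--             for ss3, j in grp:
--                 if i < j:
--                     result.add((i, j))
--     return result
-- ===== SOURCE B (Python) =====
-- def variants(string, maxdels):
--     result = {string}
--     if maxdels > 0: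
--         for i in range(len(string)):
--             result |= variants(string[:i] + string[i+1:], maxdels - 1)
--     return result
--
-- def similarity(strings, maxdels, **kwargs):
--     buckets = {}
--     for i, s in strings:
--         for ss in variants(s, maxdels, **kwargs):
--             buckets.setdefault(hash(ss), []).append(i)
--     result = set()
--     for key in sorted(buckets):
--         ids = buckets[key]
--         for a in ids:
--             for b in ids:
--                 if a < b:
--                     result.add((a, b))
--     return result
-- ===== Notes on version B (the rewrite author's own statement) =====
-- stated objective: alternative
-- what changed: B replaces A's explicit worklist-with-deletion-counter delenv, the flat (hash,id) list, the global sort and the hand-written adjacent-grouping generator by a recursive deletion-neighborhood function and a dict of hash-keyed buckets built in one pass, iterated in sorted key order to emit the same i<j pairs per bucket.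
import Mathlib
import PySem

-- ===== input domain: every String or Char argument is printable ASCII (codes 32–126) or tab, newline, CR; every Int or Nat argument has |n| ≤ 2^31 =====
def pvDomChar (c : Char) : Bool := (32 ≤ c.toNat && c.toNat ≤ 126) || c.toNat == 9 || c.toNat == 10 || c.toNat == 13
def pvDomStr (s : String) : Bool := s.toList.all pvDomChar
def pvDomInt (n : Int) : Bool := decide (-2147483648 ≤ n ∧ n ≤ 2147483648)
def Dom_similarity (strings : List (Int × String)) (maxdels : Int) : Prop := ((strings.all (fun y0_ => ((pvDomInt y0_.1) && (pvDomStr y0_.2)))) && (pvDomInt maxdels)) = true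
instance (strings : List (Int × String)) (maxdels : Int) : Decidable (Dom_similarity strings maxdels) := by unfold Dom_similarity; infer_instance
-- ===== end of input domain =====

-- B replaces A's worklist delenv + flat (hash,id) list + sort + adjacent-grouping generator by a
-- recursive deletion-neighborhood and hash-keyed buckets iterated in sorted key order (alternative
-- decomposition; same output set, not claimed faster).
-- Python's hash(ss) is modelled by the variant string ss itself: exact barring 64-bit hash
-- collisions (which would merge buckets identically in A and in B, so A = B is unaffected).
-- Both functions return Python sets; outputs are compared as finite sets, so the key-sort order used
-- here (strings instead of their hashes) and PySem.Set's insertion order are immaterial.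

-- ===== PORT A =====
-- helper `delenv` of Source A: the queue is kept reversed, so Python's queue.pop() is the head and
-- queue.append(x) conses x; substr[:i]+substr[i+1:] with 0 ≤ i < len(substr) is exactly
-- take i ++ drop (i+1) (slices with nonnegative in-range bounds).
def pvW (p : List Char × Int) : Nat := (p.1.length + 1).factorial

-- termination measure for the while-queue loop of delenv (cited by `decreasing_by` below)
lemma pv_delenv_dec (substr : List Char) (ndel maxdels : Int) (rest : List (List Char × Int)) :
    (((List.range substr.length).foldl
        (fun q i => if ndel < maxdels then ((substr.take i ++ substr.drop (i+1)), ndel + 1) :: q else q)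
        rest).map pvW).sum < (((substr, ndel) :: rest).map pvW).sum := by
  have key : ∀ {α : Type} (c : Prop) (_ : Decidable c) (g : α → List Char × Int)
      (idxs : List α) (q : List (List Char × Int)),
      (((idxs.foldl (fun q i => if c then g i :: q else q) q)).map pvW).sum
        = (if c then (idxs.map (fun i => pvW (g i))).sum else 0) + ((q.map pvW).sum) := by
    intro α c _ g idxs
    induction idxs with
    | nil => intro q; simp
    | cons a t ih =>
      intro q
      simp only [List.foldl_cons, List.map_cons, List.sum_cons]
      rw [ih]
      split_ifs with hc
      · simp; ring
      · simp
  rw [key (ndel < maxdels) inferInstance (fun i => ((substr.take i ++ substr.drop (i+1)), ndel + 1))]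
  simp only [List.map_cons, List.sum_cons]
  have hterm : ∀ i ∈ List.range substr.length,
      pvW ((substr.take i ++ substr.drop (i+1)), ndel + 1) = substr.length.factorial := by
    intro i hi
    rw [List.mem_range] at hi
    simp only [pvW, List.length_append, List.length_take, List.length_drop]
    congr 1
    omega
  have hsum : ((List.range substr.length).map
      (fun i => pvW ((substr.take i ++ substr.drop (i+1)), ndel + 1))).sum
      = substr.length * substr.length.factorial := by
    rw [List.map_congr_left hterm]
    simp [List.map_const', List.sum_replicate, smul_eq_mul]
  have hlt : substr.length * substr.length.factorial < pvW (substr, ndel) := by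
    simp only [pvW, Nat.factorial_succ]
    exact (Nat.mul_lt_mul_right (Nat.factorial_pos _)).mpr (Nat.lt_succ_self _)
  split_ifs with hc
  · rw [hsum]; omega
  · omega

def delenvLoop (maxdels : Int) (queue : List (List Char × Int)) (result : PySem.Set (List Char)) :
    PySem.Set (List Char) :=
  match queue with
  | [] => result
  | (substr, ndel) :: rest =>
      delenvLoop maxdels
        ((List.range substr.length).foldl
          (fun q i => if ndel < maxdels then ((substr.take i ++ substr.drop (i+1)), ndel + 1) :: q else q)
          rest)
        (PySem.Set.add result substr)
termination_by (queue.map pvW).sum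
decreasing_by exact pv_delenv_dec substr ndel maxdels rest

def delenv (string : List Char) (maxdels : Int) : PySem.Set (List Char) :=
  delenvLoop maxdels [(string, 0)] PySem.Set.empty

-- transliteration of the `group` generator: state = (cur_key, cur_grp, groups yielded so far)
def groupStep (st : Option (List Char) × List (List Char × Int) × List (List Char × List (List Char × Int)))
    (item : List Char × Int) :
    Option (List Char) × List (List Char × Int) × List (List Char × List (List Char × Int)) :=
  if some item.1 = st.1 then (st.1, st.2.1 ++ [item], st.2.2)
  else (some item.1, [item],
        st.2.2 ++ (match st.1 with | none => [] | some k => [(k, st.2.1)]))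

def groupFold (lst : List (List Char × Int)) : List (List Char × List (List Char × Int)) :=
  let st := lst.foldl groupStep (none, [], [])
  st.2.2 ++ (match st.1 with | none => [] | some k => [(k, st.2.1)])

def similarity (strings : List (Int × String)) (maxdels : Int) : List (Int × Int) :=
  let s_ss : List (List Char × Int) :=
    strings.foldl (fun acc p =>
      (delenv p.2.toList maxdels).foldl (fun acc2 ss => acc2 ++ [(ss, p.1)]) acc) []
  let s_ss_sorted := PySem.List.sorted s_ss (fun p => p.1)
  (groupFold s_ss_sorted).foldl (fun res g =>
    g.2.foldl (fun res p2 =>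
      g.2.foldl (fun res p3 =>
        if p2.2 < p3.2 then PySem.Set.add res (p2.2, p3.2) else res) res) res)
    PySem.Set.empty

-- ===== PORT B =====
-- Source B's `variants`: recursion on the string (each deletion shortens it), `result |= …` is
-- PySem.Set.update.
def variants (s : List Char) (d : Int) : PySem.Set (List Char) :=
  if 0 < d then
    (List.range s.length).attach.foldl
      (fun res i => PySem.Set.update res (variants (s.take i.1 ++ s.drop (i.1 + 1)) (d - 1)))
      (PySem.Set.ofList [s])
  else PySem.Set.ofList [s]
termination_by s.length
decreasing_by
  have hi : i.1 < s.length := List.mem_range.mp i.2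
  simp only [List.length_append, List.length_take, List.length_drop]
  omega

-- buckets.setdefault(hash(ss), []).append(i) is Dict.modify ss [] (· ++ [i])
def similarity_alt (strings : List (Int × String)) (maxdels : Int) : List (Int × Int) :=
  let buckets : PySem.Dict (List Char) (List Int) :=
    strings.foldl (fun d p =>
      (variants p.2.toList maxdels).foldl (fun d ss => d.modify ss [] (fun ids => ids ++ [p.1])) d)
      PySem.Dict.empty
  (PySem.List.sorted buckets.keys (fun k => k)).foldl (fun res k =>
    let ids := buckets.getD k []
    ids.foldl (fun res a =>
      ids.foldl (fun res b =>
        if a < b then PySem.Set.add res (a, b) else res) res) res)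
    PySem.Set.empty

-- ===== PRECONDITION & SPEC =====
def Spec_similarity (strings : List (Int × String)) (maxdels : Int) (out : List (Int × Int)) : Prop := out = similarity_alt strings maxdels
instance (strings : List (Int × String)) (maxdels : Int) (out : List (Int × Int)) : Decidable (Spec_similarity strings maxdels out) := by unfold Spec_similarity; infer_instance

-- ===== CLAIM (what is proved, stated in full; the proofs are below) =====
def Claim_equal_similarity : Prop := ∀ (strings : List (Int × String)) (maxdels : Int), Dom_similarity strings maxdels → Spec_similarity strings maxdels (similarity strings maxdels)

-- ===== LEMMAS AND PROOFS =====

-- "t is s with one character deleted"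
def pvDel (s t : List Char) : Prop := ∃ i < s.length, t = s.take i ++ s.drop (i + 1)

-- "x is reachable from s by at most n deletions"
def pvReach : Nat → List Char → List Char → Prop
  | 0, s, x => x = s
  | n + 1, s, x => x = s ∨ ∃ u, pvDel s u ∧ pvReach n u x

lemma pv_mem_foldl_update {α : Type} (l : List α) (f : α → List (List Char))
    (x : List Char) : ∀ (init : PySem.Set (List Char)),
    (x ∈ l.foldl (fun res i => PySem.Set.update res (f i)) init) ↔
      x ∈ init ∨ ∃ i ∈ l, x ∈ f i := by
  induction l with
  | nil => intro init; simp
  | cons a t ih =>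
    intro init
    simp only [List.foldl_cons]
    rw [ih]
    rw [PySem.Set.mem_update]
    constructor
    · rintro ((h | h) | ⟨i, hi, hx⟩)
      · exact Or.inl h
      · exact Or.inr ⟨a, List.mem_cons_self, h⟩
      · exact Or.inr ⟨i, List.mem_cons_of_mem _ hi, hx⟩
    · rintro (h | ⟨i, hi, hx⟩)
      · exact Or.inl (Or.inl h)
      · rcases List.mem_cons.mp hi with rfl | hi
        · exact Or.inl (Or.inr hx)
        · exact Or.inr ⟨i, hi, hx⟩

lemma pv_reach_succ (m : Nat) (s x : List Char) :
    pvReach (m + 1) s x ↔ x = s ∨ ∃ i < s.length, pvReach m (s.take i ++ s.drop (i + 1)) x := by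
  show (x = s ∨ ∃ u, pvDel s u ∧ pvReach m u x) ↔ _
  constructor
  · rintro (rfl | ⟨u, ⟨i, hi, rfl⟩, hr⟩)
    · exact Or.inl rfl
    · exact Or.inr ⟨i, hi, hr⟩
  · rintro (rfl | ⟨i, hi, hr⟩)
    · exact Or.inl rfl
    · exact Or.inr ⟨_, ⟨i, hi, rfl⟩, hr⟩

lemma pv_mem_variants : ∀ (n : Nat) (s : List Char) (d : Int) (x : List Char),
    s.length ≤ n → (x ∈ variants s d ↔ pvReach d.toNat s x) := by
  intro n
  induction n with
  | zero =>
    intro s d x hlen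
    have hs : s = [] := List.length_eq_zero_iff.mp (Nat.le_zero.mp hlen)
    subst hs
    have hv : x ∈ variants [] d ↔ x = [] := by
      rw [variants]
      split_ifs <;> simp [PySem.Set.mem_ofList]
    rw [hv]
    rcases h : d.toNat with _ | m
    · simp [pvReach]
    · rw [pv_reach_succ]
      simp
  | succ n ih =>
    intro s d x hlen
    by_cases hd : 0 < d
    · rw [variants, if_pos hd]
      rw [pv_mem_foldl_update]
      have hnat : d.toNat = (d - 1).toNat + 1 := by omega
      rw [hnat, pv_reach_succ]
      have hinit : x ∈ PySem.Set.ofList [s] ↔ x = s := by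
        simp [PySem.Set.mem_ofList]
      rw [hinit]
      apply or_congr Iff.rfl
      constructor
      · rintro ⟨⟨i, hmem⟩, _, hx⟩
        have hi : i < s.length := List.mem_range.mp hmem
        refine ⟨i, hi, ?_⟩
        rw [← ih (s.take i ++ s.drop (i + 1)) (d - 1) x (by
          simp only [List.length_append, List.length_take, List.length_drop]; omega)]
        exact hx
      · rintro ⟨i, hi, hr⟩
        refine ⟨⟨i, List.mem_range.mpr hi⟩, List.mem_attach _ _, ?_⟩
        rw [ih (s.take i ++ s.drop (i + 1)) (d - 1) x (by
          simp only [List.length_append, List.length_take, List.length_drop]; omega)]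
        exact hr
    · rw [variants, if_neg hd]
      have hnat : d.toNat = 0 := by omega
      rw [hnat]
      simp [PySem.Set.mem_ofList, pvReach]

lemma pv_mem_queue_foldl {α : Type} (c : Prop) [Decidable c] (g : α → List Char × Int)
    (l : List α) (p : List Char × Int) : ∀ (q : List (List Char × Int)),
    (p ∈ l.foldl (fun q i => if c then g i :: q else q) q) ↔
      p ∈ q ∨ (c ∧ ∃ i ∈ l, p = g i) := by
  induction l with
  | nil => intro q; simp
  | cons a t ih =>
    intro q
    simp only [List.foldl_cons]
    rw [ih]
    split_ifs with hc
    · constructor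
      · rintro (h | ⟨-, i, hi, rfl⟩)
        · rcases List.mem_cons.mp h with rfl | h
          · exact Or.inr ⟨hc, a, List.mem_cons_self, rfl⟩
          · exact Or.inl h
        · exact Or.inr ⟨hc, i, List.mem_cons_of_mem _ hi, rfl⟩
      · rintro (h | ⟨-, i, hi, rfl⟩)
        · exact Or.inl (List.mem_cons_of_mem _ h)
        · rcases List.mem_cons.mp hi with rfl | hi
          · exact Or.inl List.mem_cons_self
          · exact Or.inr ⟨hc, i, hi, rfl⟩
    · constructor
      · rintro (h | ⟨hcc, i, hi, rfl⟩)
        · exact Or.inl h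
        · exact absurd hcc hc
      · rintro (h | ⟨hcc, i, hi, rfl⟩)
        · exact Or.inl h
        · exact absurd hcc hc

lemma pv_reach_step (substr : List Char) (ndel maxdels : Int) (x : List Char) :
    pvReach ((maxdels - ndel).toNat) substr x ↔
      x = substr ∨ (ndel < maxdels ∧ ∃ i < substr.length,
        pvReach ((maxdels - (ndel + 1)).toNat) (substr.take i ++ substr.drop (i + 1)) x) := by
  by_cases hc : ndel < maxdels
  · have h : (maxdels - ndel).toNat = (maxdels - (ndel + 1)).toNat + 1 := by omega
    rw [h, pv_reach_succ]
    simp [hc]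
  · have h : (maxdels - ndel).toNat = 0 := by omega
    rw [h]
    simp [pvReach, hc]

lemma pv_mem_delenvLoop : ∀ (maxdels : Int) (queue : List (List Char × Int))
    (res : PySem.Set (List Char)) (x : List Char),
    x ∈ delenvLoop maxdels queue res ↔
      x ∈ res ∨ ∃ p ∈ queue, pvReach ((maxdels - p.2).toNat) p.1 x := by
  intro maxdels queue res
  induction queue, res using delenvLoop.induct maxdels with
  | case1 res => intro x; simp [delenvLoop]
  | case2 res substr ndel rest ih =>
    intro x
    rw [delenvLoop]
    simp only [dite_eq_ite] at ih
    rw [ih]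
    have hq : ∀ (P : List Char × Int → Prop),
        (∃ p ∈ (List.range substr.length).foldl
          (fun q i => if ndel < maxdels then ((substr.take i ++ substr.drop (i+1)), ndel + 1) :: q else q)
          rest, P p)
        ↔ (∃ p ∈ rest, P p) ∨ ((ndel < maxdels) ∧ ∃ i < substr.length,
            P ((substr.take i ++ substr.drop (i + 1)), ndel + 1)) := by
      intro P
      constructor
      · rintro ⟨p, hp, hP⟩
        rcases (pv_mem_queue_foldl _ _ _ p rest).mp hp with h | ⟨hc, i, hi, rfl⟩
        · exact Or.inl ⟨p, h, hP⟩
        · exact Or.inr ⟨hc, i, List.mem_range.mp hi, hP⟩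
      · rintro (⟨p, hp, hP⟩ | ⟨hc, i, hi, hP⟩)
        · exact ⟨p, (pv_mem_queue_foldl _ _ _ p rest).mpr (Or.inl hp), hP⟩
        · exact ⟨_, (pv_mem_queue_foldl _ _ _ _ rest).mpr
            (Or.inr ⟨hc, i, List.mem_range.mpr hi, rfl⟩), hP⟩
    rw [hq]
    rw [PySem.Set.mem_add]
    constructor
    · rintro ((h | hx) | (⟨p, hp, hP⟩ | ⟨hc, i, hi, hP⟩))
      · exact Or.inl h
      · exact Or.inr ⟨(substr, ndel), List.mem_cons_self, (pv_reach_step _ _ _ _).mpr (Or.inl hx)⟩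
      · exact Or.inr ⟨p, List.mem_cons_of_mem _ hp, hP⟩
      · exact Or.inr ⟨(substr, ndel), List.mem_cons_self,
          (pv_reach_step _ _ _ _).mpr (Or.inr ⟨hc, i, hi, hP⟩)⟩
    · rintro (h | ⟨p, hp, hP⟩)
      · exact Or.inl (Or.inl h)
      · rcases List.mem_cons.mp hp with rfl | hp
        · rcases (pv_reach_step _ _ _ _).mp hP with hx | ⟨hc, i, hi, hr⟩
          · exact Or.inl (Or.inr hx)
          · exact Or.inr (Or.inr ⟨hc, i, hi, hr⟩)
        · exact Or.inr (Or.inl ⟨p, hp, hP⟩)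

lemma pv_mem_delenv (s : List Char) (d : Int) (x : List Char) :
    x ∈ delenv s d ↔ pvReach d.toNat s x := by
  rw [delenv, pv_mem_delenvLoop]
  simp [PySem.Set.empty]

lemma pv_mem_var_del (s : List Char) (d : Int) (x : List Char) :
    x ∈ variants s d ↔ x ∈ delenv s d := by
  rw [pv_mem_variants s.length s d x le_rfl, pv_mem_delenv]

lemma pv_nodup_update (s : PySem.Set (List Char)) (xs : List (List Char)) :
    s.Nodup → (PySem.Set.update s xs).Nodup := by
  induction xs generalizing s with
  | nil => intro h; simpa [PySem.Set.update] using h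
  | cons a t ih =>
    intro h
    have hu : PySem.Set.update s (a :: t) = PySem.Set.update (PySem.Set.add s a) t := by
      simp [PySem.Set.update]
    rw [hu]
    exact ih _ (PySem.Set.nodup_add _ _ h)

lemma pv_nodup_delenvLoop (maxdels : Int) (queue : List (List Char × Int))
    (res : PySem.Set (List Char)) : res.Nodup → (delenvLoop maxdels queue res).Nodup := by
  induction queue, res using delenvLoop.induct maxdels with
  | case1 res => intro h; simpa [delenvLoop] using h
  | case2 res substr ndel rest ih =>
    intro h
    rw [delenvLoop]
    simp only [dite_eq_ite] at ih
    exact ih (PySem.Set.nodup_add _ _ h)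

lemma pv_nodup_delenv (s : List Char) (d : Int) : (delenv s d).Nodup :=
  pv_nodup_delenvLoop d [(s, 0)] PySem.Set.empty List.nodup_nil

lemma pv_nodup_foldl_update {α : Type} (l : List α) (f : α → List (List Char)) :
    ∀ (init : PySem.Set (List Char)), init.Nodup →
    (l.foldl (fun res i => PySem.Set.update res (f i)) init).Nodup := by
  induction l with
  | nil => intro init h; simpa using h
  | cons a t ih => intro init h; exact ih _ (pv_nodup_update _ _ h)

lemma pv_nodup_variants (s : List Char) (d : Int) : (variants s d).Nodup := by
  rw [variants]
  split_ifs
  · exact pv_nodup_foldl_update _ _ _ (PySem.Set.nodup_ofList _)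
  · exact PySem.Set.nodup_ofList _

-- filtering one key out of one string's (variant, id) block, for a duplicate-free variant list
lemma pv_filter_block (l : List (List Char)) (i : Int) (k : List Char) (hl : l.Nodup) :
    (l.map (fun ss => (ss, i))).filter (fun p => decide (p.1 = k))
      = if k ∈ l then [(k, i)] else [] := by
  induction l with
  | nil => simp
  | cons a t ih =>
    rcases List.nodup_cons.mp hl with ⟨ha, ht⟩
    simp only [List.map_cons, List.filter_cons]
    by_cases hak : a = k
    · subst hak
      have hnil : (t.map (fun ss => (ss, i))).filter (fun p => decide (p.1 = a)) = [] := by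
        rw [List.filter_eq_nil_iff]
        intro p hp
        obtain ⟨ss, hss, rfl⟩ := List.mem_map.mp hp
        simp only [decide_eq_true_eq]
        rintro rfl
        exact ha hss
      simp [hnil]
    · rw [ih ht]
      have hmem : (k ∈ a :: t) = (k ∈ t) := by
        simp only [List.mem_cons, eq_iff_iff]
        exact ⟨fun h => h.resolve_left (fun h' => hak h'.symm), Or.inr⟩
      simp [hak, hmem]

def grpFrom (k : List Char) (cg : List (List Char × Int)) :
    List (List Char × Int) → List (List Char × List (List Char × Int))
  | [] => [(k, cg)]
  | item :: rest =>
      if item.1 = k then grpFrom k (cg ++ [item]) rest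
      else (k, cg) :: grpFrom item.1 [item] rest

lemma groupFold_go (lst : List (List Char × Int)) :
    ∀ (k : List Char) cg out,
    (let st := lst.foldl groupStep (some k, cg, out); st.2.2 ++ (match st.1 with | none => [] | some k => [(k, st.2.1)]))
      = out ++ grpFrom k cg lst := by
  induction lst with
  | nil => intro k cg out; simp [grpFrom]
  | cons item rest ih =>
    intro k cg out
    simp only [List.foldl_cons, groupStep, grpFrom]
    by_cases h : item.1 = k
    · simp only [h, if_true]
      exact ih k (cg ++ [item]) out
    · have h2 : ¬ (some item.1 = some k) := by simpa using h
      simp only [if_neg h2, if_neg h]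
      rw [ih item.1 [item] (out ++ [(k, cg)])]
      simp

lemma groupFold_nil : groupFold [] = [] := rfl

lemma groupFold_cons (x : List Char × Int) (rest : List (List Char × Int)) :
    groupFold (x :: rest) = grpFrom x.1 [x] rest := by
  simp only [groupFold, List.foldl_cons, groupStep]
  rw [if_neg (by simp)]
  exact groupFold_go rest x.1 [x] []

lemma grpFrom_spec (lst : List (List Char × Int)) :
    ∀ (k : List Char) cg,
    grpFrom k cg lst = (k, cg ++ lst.takeWhile (fun p => p.1 = k)) ::
      groupFold (lst.dropWhile (fun p => p.1 = k)) := by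
  induction lst with
  | nil => intro k cg; simp [grpFrom, groupFold_nil]
  | cons item rest ih =>
    intro k cg
    by_cases h : item.1 = k
    · simp only [grpFrom, List.takeWhile_cons, List.dropWhile_cons, h, decide_true, if_true]
      rw [ih k (cg ++ [item])]
      simp
    · simp only [grpFrom, List.takeWhile_cons, List.dropWhile_cons, decide_eq_true_eq, if_neg h]
      rw [groupFold_cons]
      simp

lemma groupFold_eq (x : List Char × Int) (rest : List (List Char × Int)) :
    groupFold (x :: rest) = (x.1, (x :: rest).takeWhile (fun p => p.1 = x.1)) ::
      groupFold ((x :: rest).dropWhile (fun p => p.1 = x.1)) := by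
  rw [groupFold_cons, grpFrom_spec]
  simp

-- the LT/DecidableLT instances picked by elaboration agree with the LinearOrder ones
lemma pv_sorted_key_inst (l : List (List Char)) :
    PySem.List.sorted l (fun u => u)
      = @PySem.List.sorted (List Char) (List Char) List.instLinearOrder.toLT LinearOrder.toDecidableLT l (fun u => u) false := by
  congr 1

lemma pv_sorted_pair_inst (l : List (List Char × Int)) :
    PySem.List.sorted l (fun p => p.1)
      = @PySem.List.sorted (List Char × Int) (List Char) List.instLinearOrder.toLT LinearOrder.toDecidableLT l (fun p => p.1) false := by
  congr 1

-- stability of Python's sort: filtering one key class commutes with sorting by that key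
lemma pv_filter_insertBy (k : List Char) (x : List Char × Int) (ys : List (List Char × Int))
    (hys : ys.Pairwise (fun a b => a.1 ≤ b.1)) :
    (PySem.List.insertBy (fun a b => decide (a.1 < b.1)) x ys).filter (fun p => decide (p.1 = k))
      = ys.filter (fun p => decide (p.1 = k)) ++ if x.1 = k then [x] else [] := by
  induction ys with
  | nil => simp [PySem.List.insertBy]; split_ifs <;> simp_all
  | cons y ys ih =>
    simp only [PySem.List.insertBy]
    by_cases hlt : x.1 < y.1
    · simp only [decide_eq_true_eq, if_pos hlt]
      by_cases hk : x.1 = k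
      · have hnil : (y :: ys).filter (fun p => decide (p.1 = k)) = [] := by
          rw [List.filter_eq_nil_iff]
          intro p hp
          have : y.1 ≤ p.1 := by
            rcases List.mem_cons.mp hp with rfl | hp
            · exact le_refl _
            · exact (List.pairwise_cons.mp hys).1 p hp
          simp only [decide_eq_true_eq]
          intro hpk
          rw [hpk, ← hk] at this
          exact absurd (lt_of_lt_of_le hlt this) (lt_irrefl _)
        rw [List.filter_cons_of_pos (by simp [hk]), hnil, if_pos hk]
        simp
      · simp [List.filter_cons, hk]
    · simp only [decide_eq_true_eq, if_neg hlt]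
      rw [List.filter_cons, List.filter_cons]
      rw [ih (List.pairwise_cons.mp hys).2]
      split_ifs <;> simp

lemma pv_filter_foldl (k : List Char) (l : List (List Char × Int)) :
    ∀ (l' : List (List Char × Int)),
    ((l.foldl (fun acc x => PySem.List.insertBy (fun a b => decide (a.1 < b.1)) x acc)
        (PySem.List.sorted l' (fun p => p.1))).filter (fun p => decide (p.1 = k)))
      = (PySem.List.sorted l' (fun p => p.1)).filter (fun p => decide (p.1 = k))
        ++ l.filter (fun p => decide (p.1 = k)) := by
  induction l with
  | nil => intro l'; simp
  | cons a t ih =>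
    intro l'
    have hins : PySem.List.insertBy (fun a b => decide (a.1 < b.1)) a (PySem.List.sorted l' (fun p => p.1))
        = PySem.List.sorted (l' ++ [a]) (fun p => p.1) := by
      rw [PySem.List.sorted_eq_foldl_insertBy (l' ++ [a]), List.foldl_append,
        ← PySem.List.sorted_eq_foldl_insertBy]
      simp
    simp only [List.foldl_cons, hins]
    rw [ih (l' ++ [a])]
    have hfs : (PySem.List.sorted (l' ++ [a]) (fun p => p.1)).filter (fun p => decide (p.1 = k))
        = (PySem.List.sorted l' (fun p => p.1)).filter (fun p => decide (p.1 = k))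
          ++ if a.1 = k then [a] else [] := by
      rw [← hins]
      have hpw := PySem.List.sorted_pairwise l' (fun p => p.1)
      rw [← pv_sorted_pair_inst] at hpw
      exact pv_filter_insertBy k a _ hpw
    rw [hfs, List.filter_cons]
    split_ifs with h1 <;> simp_all

lemma pv_filter_sorted (k : List Char) (l : List (List Char × Int)) :
    (PySem.List.sorted l (fun p => p.1)).filter (fun p => decide (p.1 = k))
      = l.filter (fun p => decide (p.1 = k)) := by
  have := pv_filter_foldl k l []
  rw [PySem.List.sorted_eq_foldl_insertBy l]
  simpa using this

lemma pv_dropWhile_gt (k : List Char) :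
    ∀ (q : List (List Char × Int)), q.Pairwise (fun a b => a.1 ≤ b.1) →
    (∀ p ∈ q, k ≤ p.1) →
    ∀ p ∈ q.dropWhile (fun p => decide (p.1 = k)), k < p.1 := by
  intro q
  induction q with
  | nil => simp
  | cons y t ih =>
    intro hp hb
    rw [List.dropWhile_cons]
    split_ifs with hy
    · exact ih (List.pairwise_cons.mp hp).2 (fun p hp' => hb p (List.mem_cons_of_mem _ hp'))
    · simp only [decide_eq_true_eq] at hy
      have hky : k < y.1 := lt_of_le_of_ne (hb y (List.mem_cons_self)) (fun h => hy h.symm)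
      intro p hmem
      rcases List.mem_cons.mp hmem with rfl | hmem
      · exact hky
      · exact lt_of_lt_of_le hky ((List.pairwise_cons.mp hp).1 p hmem)

-- MAIN: grouping a key-sorted list is indexing by its sorted distinct keys
lemma pv_main : ∀ (n : Nat) (q : List (List Char × Int)), q.length ≤ n →
    q.Pairwise (fun a b => a.1 ≤ b.1) →
    groupFold q = (PySem.List.sorted (PySem.Set.ofList (q.map (fun p => p.1))) (fun k => k)).map
      (fun k => (k, q.filter (fun p => decide (p.1 = k)))) := by
  intro n
  induction n with
  | zero =>
    intro q hlen _
    have : q = [] := List.length_eq_zero_iff.mp (Nat.le_zero.mp hlen)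
    subst this
    simp [groupFold_nil, PySem.Set.ofList, PySem.List.sorted]
  | succ n ih =>
    intro q hlen hq
    match q with
    | [] => simp [groupFold_nil, PySem.Set.ofList, PySem.List.sorted]
    | x :: rest =>
      set k := x.1 with hk
      set T := (x :: rest).takeWhile (fun p => decide (p.1 = k)) with hT
      set D := (x :: rest).dropWhile (fun p => decide (p.1 = k)) with hD
      have hTD : T ++ D = x :: rest := List.takeWhile_append_dropWhile
      have hTk : ∀ p ∈ T, p.1 = k := by
        intro p hp
        have := List.mem_takeWhile_imp hp
        simpa using this
      have hbound : ∀ p ∈ x :: rest, k ≤ p.1 := by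
        intro p hp
        rcases List.mem_cons.mp hp with rfl | hp
        · exact le_refl _
        · exact (List.pairwise_cons.mp hq).1 p hp
      have hDgt : ∀ p ∈ D, k < p.1 := pv_dropWhile_gt k (x :: rest) hq hbound
      have hDpair : D.Pairwise (fun a b => a.1 ≤ b.1) := hq.sublist (List.dropWhile_sublist _)
      have hDlen : D.length ≤ n := by
        have h1 : D.length ≤ rest.length := by
          rw [hD, List.dropWhile_cons, if_pos (by simp [hk])]
          exact List.length_dropWhile_le _ _
        simpa using le_trans h1 (Nat.le_of_succ_le_succ hlen)
      have hIH := ih D hDlen hDpair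
      have hgf : groupFold (x :: rest) = (k, T) :: groupFold D := by
        rw [groupFold_eq]
      have hfk : (x :: rest).filter (fun p => decide (p.1 = k)) = T := by
        conv_lhs => rw [← hTD]
        rw [List.filter_append]
        rw [List.filter_eq_self.mpr (by intro p hp; simpa using hTk p hp),
          List.filter_eq_nil_iff.mpr (by intro p hp; simpa using ne_of_gt (hDgt p hp))]
        simp
      have hfk' : ∀ k', k ≠ k' → (x :: rest).filter (fun p => decide (p.1 = k'))
          = D.filter (fun p => decide (p.1 = k')) := by
        intro k' hne
        conv_lhs => rw [← hTD]
        rw [List.filter_append, List.filter_eq_nil_iff.mpr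
          (by intro p hp; simp [hTk p hp]; exact hne)]
        simp
      have hmemD : ∀ y, y ∈ PySem.List.sorted (PySem.Set.ofList (D.map (fun p => p.1))) (fun u => u)
          ↔ ∃ p ∈ D, p.1 = y := by
        intro y
        rw [PySem.List.mem_sorted, PySem.Set.mem_ofList, List.mem_map]
      have hTx : x ∈ T := by
        rw [hT, List.takeWhile_cons, if_pos (by simp [hk])]
        exact List.mem_cons_self
      have hSK : PySem.List.sorted (PySem.Set.ofList ((x :: rest).map (fun p => p.1))) (fun u => u)
          = k :: PySem.List.sorted (PySem.Set.ofList (D.map (fun p => p.1))) (fun u => u) := by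
        have hndtail : (PySem.List.sorted (PySem.Set.ofList (D.map (fun p => p.1))) (fun u => u)).Nodup :=
          (PySem.List.sorted_perm _ _ _).symm.nodup (PySem.Set.nodup_ofList _)
        have hknot : k ∉ PySem.List.sorted (PySem.Set.ofList (D.map (fun p => p.1))) (fun u => u) := by
          intro hmem
          obtain ⟨p, hp, hpk⟩ := (hmemD k).mp hmem
          exact absurd (hpk ▸ hDgt p hp) (lt_irrefl k)
        have hperm : (k :: PySem.List.sorted (PySem.Set.ofList (D.map (fun p => p.1))) (fun u => u)).Perm
            (PySem.Set.ofList ((x :: rest).map (fun p => p.1))) := by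
          rw [List.perm_ext_iff_of_nodup (List.nodup_cons.mpr ⟨hknot, hndtail⟩) (PySem.Set.nodup_ofList _)]
          intro y
          rw [List.mem_cons, hmemD y, PySem.Set.mem_ofList, List.mem_map]
          constructor
          · rintro (rfl | ⟨p, hp, rfl⟩)
            · exact ⟨x, List.mem_cons_self, rfl⟩
            · refine ⟨p, ?_, rfl⟩
              rw [← hTD]; exact List.mem_append_right _ hp
          · rintro ⟨p, hp, rfl⟩
            rw [← hTD] at hp
            rcases List.mem_append.mp hp with hp | hp
            · exact Or.inl (hTk p hp)
            · exact Or.inr ⟨p, hp, rfl⟩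
        have hpw : (k :: PySem.List.sorted (PySem.Set.ofList (D.map (fun p => p.1))) (fun u => u)).Pairwise
            (fun a b => a < b) := by
          rw [List.pairwise_cons]
          refine ⟨?_, ?_⟩
          · intro y hy
            obtain ⟨p, hp, rfl⟩ := (hmemD y).mp hy
            exact hDgt p hp
          · rw [pv_sorted_key_inst]
            exact PySem.List.sorted_ofList_pairwise_lt _
        rw [pv_sorted_key_inst (PySem.Set.ofList ((x :: rest).map (fun p => p.1)))]
        rw [pv_sorted_key_inst (PySem.Set.ofList (D.map (fun p => p.1)))] at hperm hpw ⊢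
        exact PySem.List.sorted_eq_of_perm_of_pairwise_lt _ _ _ hperm hpw
      rw [hgf, hSK, List.map_cons, hfk, hIH]
      congr 1
      apply List.map_congr_left
      intro k' hk'
      have hkk' : k < k' := by
        obtain ⟨p, hp, rfl⟩ := (hmemD k').mp hk'
        exact hDgt p hp
      rw [hfk' k' (ne_of_lt hkk')]

lemma pv_ofList_perm {xs ys : List (List Char)} (h : ∀ a, a ∈ xs ↔ a ∈ ys) :
    (PySem.Set.ofList xs).Perm (PySem.Set.ofList ys) := by
  rw [List.perm_ext_iff_of_nodup (PySem.Set.nodup_ofList _) (PySem.Set.nodup_ofList _)]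
  intro a
  rw [PySem.Set.mem_ofList, PySem.Set.mem_ofList]
  exact h a

lemma pv_beq (a b : List Char) : (a == b) = decide (a = b) := by
  by_cases h : a = b <;> simp [h]

-- the flat (deletion-variant, id) pair lists the two programs traverse
def pvPairsA (strings : List (Int × String)) (maxdels : Int) : List (List Char × Int) :=
  strings.flatMap (fun p => (delenv p.2.toList maxdels).map (fun ss => (ss, p.1)))

def pvPairsB (strings : List (Int × String)) (maxdels : Int) : List (List Char × Int) :=
  strings.flatMap (fun p => (variants p.2.toList maxdels).map (fun ss => (ss, p.1)))

lemma pv_filterA (strings : List (Int × String)) (maxdels : Int) (k : List Char) :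
    (pvPairsA strings maxdels).filter (fun p => decide (p.1 = k))
      = strings.flatMap (fun p => if k ∈ delenv p.2.toList maxdels then [(k, p.1)] else []) := by
  rw [pvPairsA, List.filter_flatMap]
  exact congrArg strings.flatMap (funext fun p => pv_filter_block _ _ _ (pv_nodup_delenv _ _))

lemma pv_filterB (strings : List (Int × String)) (maxdels : Int) (k : List Char) :
    (pvPairsB strings maxdels).filter (fun p => decide (p.1 = k))
      = strings.flatMap (fun p => if k ∈ delenv p.2.toList maxdels then [(k, p.1)] else []) := by
  rw [pvPairsB, List.filter_flatMap]
  refine congrArg strings.flatMap (funext fun p => ?_)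
  rw [pv_filter_block _ _ _ (pv_nodup_variants _ _)]
  by_cases h : k ∈ delenv p.2.toList maxdels
  · rw [if_pos ((pv_mem_var_del _ _ _).mpr h), if_pos h]
  · rw [if_neg (fun hh => h ((pv_mem_var_del _ _ _).mp hh)), if_neg h]

lemma pv_key_memA (strings : List (Int × String)) (maxdels : Int) (k : List Char) :
    k ∈ (pvPairsA strings maxdels).map (fun p => p.1) ↔
      ∃ p ∈ strings, k ∈ delenv p.2.toList maxdels := by
  rw [pvPairsA, List.map_flatMap]
  simp [List.mem_flatMap]

lemma pv_key_memB (strings : List (Int × String)) (maxdels : Int) (k : List Char) :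
    k ∈ (pvPairsB strings maxdels).map (fun p => p.1) ↔
      ∃ p ∈ strings, k ∈ delenv p.2.toList maxdels := by
  simp only [pvPairsB, List.mem_map, List.mem_flatMap]
  constructor
  · rintro ⟨q, ⟨p, hp, ss, hss, rfl⟩, rfl⟩
    exact ⟨p, hp, (pv_mem_var_del _ _ _).mp hss⟩
  · rintro ⟨p, hp, hk⟩
    exact ⟨(k, p.1), ⟨p, hp, k, (pv_mem_var_del _ _ _).mpr hk, rfl⟩, rfl⟩

-- ===== VERDICT (by name: the statement is the Claim_ definition above) =====
theorem similarity_spec : Claim_equal_similarity := by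
  intro strings maxdels _
  unfold Spec_similarity similarity similarity_alt
  -- flatten A's s_ss construction to the flat pair list
  have hA : strings.foldl (fun acc p =>
      (delenv p.2.toList maxdels).foldl (fun acc2 ss => acc2 ++ [(ss, p.1)]) acc) []
      = pvPairsA strings maxdels := by
    simp only [PySem.List.foldl_append_singleton_eq_map, pvPairsA,
      PySem.List.foldl_append_eq_flatMap, List.nil_append]
  -- flatten B's bucket construction to a fold over its flat pair list
  have hB : strings.foldl (fun d p =>
      (variants p.2.toList maxdels).foldl (fun d ss => d.modify ss [] (fun ids => ids ++ [p.1])) d)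
      PySem.Dict.empty
      = (pvPairsB strings maxdels).foldl
          (fun d q => d.modify q.1 [] (fun ids => ids ++ [q.2])) PySem.Dict.empty := by
    rw [pvPairsB, List.foldl_flatMap]
    simp only [List.foldl_map]
  -- bucket contents and keys
  have hgetD : ∀ kk, (((pvPairsB strings maxdels).foldl
      (fun d q => d.modify q.1 [] (fun ids => ids ++ [q.2])) PySem.Dict.empty).getD kk [])
      = ((pvPairsA strings maxdels).filter (fun p => decide (p.1 = kk))).map (fun p => p.2) := by
    intro kk
    rw [PySem.Dict.getD_foldl_modify_append]
    have hbq : (fun p : List Char × Int => p.1 == kk) = (fun p => decide (p.1 = kk)) := by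
      funext p; exact pv_beq p.1 kk
    rw [pv_filterA]
    rw [← pv_filterB]
    simp [PySem.Dict.empty, PySem.Dict.getD, PySem.Dict.get?, hbq]
  have hkeys : ((pvPairsB strings maxdels).foldl
      (fun d q => d.modify q.1 [] (fun ids => ids ++ [q.2])) PySem.Dict.empty).keys
      = PySem.Set.ofList ((pvPairsB strings maxdels).map (fun p => p.1)) := by
    rw [PySem.Dict.keys_foldl_modify_key (pvPairsB strings maxdels) (fun q => q.1) []
      (fun _ q => fun ids => ids ++ [q.2])]
    simp [PySem.Dict.empty, PySem.Dict.keys, PySem.Set.update_nil_left]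
  -- the two key enumerations coincide
  have hkeysSorted :
      PySem.List.sorted (PySem.Set.ofList ((PySem.List.sorted (pvPairsA strings maxdels) (fun p => p.1)).map (fun p => p.1))) (fun u => u)
      = PySem.List.sorted (PySem.Set.ofList ((pvPairsB strings maxdels).map (fun p => p.1))) (fun u => u) := by
    rw [pv_sorted_key_inst, pv_sorted_key_inst]
    refine PySem.List.sorted_eq_sorted_of_perm _ _ _ (fun a b h => h) ?_
    apply pv_ofList_perm
    intro a
    rw [pv_key_memB]
    rw [← pv_key_memA]
    constructor
    · intro h
      obtain ⟨p, hp, rfl⟩ := List.mem_map.mp h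
      exact List.mem_map_of_mem ((PySem.List.sorted_perm _ _ _).mem_iff.mp hp)
    · intro h
      obtain ⟨p, hp, rfl⟩ := List.mem_map.mp h
      exact List.mem_map_of_mem ((PySem.List.sorted_perm _ _ _).mem_iff.mpr hp)
  -- A's grouping, rewritten by the main lemma and sort stability
  have hgrp : groupFold (PySem.List.sorted (pvPairsA strings maxdels) (fun p => p.1))
      = (PySem.List.sorted (PySem.Set.ofList ((PySem.List.sorted (pvPairsA strings maxdels) (fun p => p.1)).map (fun p => p.1))) (fun u => u)).map
        (fun kk => (kk, (pvPairsA strings maxdels).filter (fun p => decide (p.1 = kk)))) := by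
    have hpw : (PySem.List.sorted (pvPairsA strings maxdels) (fun p => p.1)).Pairwise
        (fun a b => a.1 ≤ b.1) := by
      rw [pv_sorted_pair_inst]
      exact PySem.List.sorted_pairwise (pvPairsA strings maxdels) (fun p => p.1)
    rw [pv_main (PySem.List.sorted (pvPairsA strings maxdels) (fun p => p.1)).length _ le_rfl hpw]
    apply List.map_congr_left
    intro kk _
    rw [pv_filter_sorted]
  dsimp only
  rw [hA, hB, hgrp, hkeys, ← hkeysSorted, List.foldl_map]
  apply PySem.List.foldl_congr_mem
  intro res kk _
  dsimp only
  rw [hgetD kk]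
  simp only [List.foldl_map]
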